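-- pv_equiv track=rewrite | github.com/Ryder-MHumble/Nexus | app/services/core/institution/leadership.py | _compute_role_counts
-- ===== SOURCE A (Python) =====
-- from typing import Any
--
-- def _normalize_str(value: Any) -> str:
--     return str(value or "").strip()
--
-- def _compute_role_counts(leaders: list[dict[str, Any]]) -> dict[str, int]:
--     role_counts: dict[str, int] = {}
--     for leader in leaders:
--         role = _normalize_str(leader.get("role"))
--         if not role:
--             continue
--         role_counts[role] = role_counts.get(role, 0) + 1
--     return role_counts
-- ===== SOURCE B (Python) =====
-- def _normalize_str(value):
--     return str(value or "").strip()
--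
-- def _compute_role_counts(leaders):
--     roles = [r for leader in leaders if (r := _normalize_str(leader.get("role")))]
--     distinct = list(dict.fromkeys(roles))
--     return {r: roles.count(r) for r in distinct}
-- ===== Notes on version B (the rewrite author's own statement) =====
-- stated objective: alternative
-- what changed: Replaced the incremental dict-counting loop by a flatten-then-dedup-then-count-per-distinct-role decomposition (one comprehension collects normalized roles, dict.fromkeys dedups in first-occurrence order, list.count counts each).
import Mathlib
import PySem

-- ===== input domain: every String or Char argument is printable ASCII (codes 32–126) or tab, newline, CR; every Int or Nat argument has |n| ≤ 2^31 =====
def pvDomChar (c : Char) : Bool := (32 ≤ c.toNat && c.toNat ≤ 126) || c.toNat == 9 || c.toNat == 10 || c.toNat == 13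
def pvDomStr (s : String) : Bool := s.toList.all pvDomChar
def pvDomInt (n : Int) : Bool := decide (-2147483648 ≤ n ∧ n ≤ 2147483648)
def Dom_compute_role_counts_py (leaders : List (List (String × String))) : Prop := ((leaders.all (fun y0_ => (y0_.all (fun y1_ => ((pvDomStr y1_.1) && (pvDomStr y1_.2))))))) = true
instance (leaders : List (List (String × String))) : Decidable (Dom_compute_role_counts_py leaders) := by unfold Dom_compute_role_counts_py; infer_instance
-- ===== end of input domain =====

-- B replaces A's incremental dict-counting loop by flatten → ordered dedup → count per distinct role (alternative decomposition, same results).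

-- ===== PORT A =====
-- _normalize_str(leader.get("role")): get returns None for a missing key, 'value or ""' maps None/"" to "", then .strip()
def pvNormalizeRole (leader : List (String × String)) : String :=
  PySem.Str.strip (((PySem.Dict.mk leader).get? "role").getD "")

def compute_role_counts_py (leaders : List (List (String × String))) : List (String × Int) :=
  (leaders.foldl (fun (role_counts : PySem.Dict String Int) leader =>
      let role := pvNormalizeRole leader
      if role = "" then role_counts
      else role_counts.insert role (role_counts.getD role 0 + 1))
    PySem.Dict.empty).items

-- ===== PORT B =====
def compute_role_counts_py_alt (leaders : List (List (String × String))) : List (String × Int) :=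
  let roles := leaders.filterMap (fun leader =>
      let r := pvNormalizeRole leader
      if r = "" then none else some r)
  (PySem.List.dedup roles).map (fun r => (r, (roles.count r : Int)))

-- ===== PRECONDITION & SPEC =====
def Spec_compute_role_counts_py (leaders : List (List (String × String))) (out : List (String × Int)) : Prop := out = compute_role_counts_py_alt leaders
instance (leaders : List (List (String × String))) (out : List (String × Int)) : Decidable (Spec_compute_role_counts_py leaders out) := by unfold Spec_compute_role_counts_py; infer_instance

-- ===== CLAIM (what is proved, stated in full; the proofs are below) =====
def Claim_equal_compute_role_counts_py : Prop := ∀ (leaders : List (List (String × String))), Dom_compute_role_counts_py leaders → Spec_compute_role_counts_py leaders (compute_role_counts_py leaders)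

-- ===== LEMMAS AND PROOFS =====

-- A's loop over leaders, which skips empty normalized roles, is the count-accumulating
-- fold over the flat list of non-empty normalized roles.
theorem pv_foldA_eq_foldRoles (leaders : List (List (String × String)))
    (d : PySem.Dict String Int) :
    leaders.foldl (fun (role_counts : PySem.Dict String Int) leader =>
        let role := pvNormalizeRole leader
        if role = "" then role_counts
        else role_counts.insert role (role_counts.getD role 0 + 1)) d
    = (leaders.filterMap (fun leader =>
        let r := pvNormalizeRole leader
        if r = "" then none else some r)).foldl
        (fun (role_counts : PySem.Dict String Int) r =>
          role_counts.insert r (role_counts.getD r 0 + 1)) d := by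
  induction leaders generalizing d with
  | nil => rfl
  | cons L rest ih =>
    simp only [List.foldl_cons, List.filterMap_cons]
    by_cases h : pvNormalizeRole L = "" <;> simp [h, ih]

theorem compute_role_counts_py_spec_aux (leaders : List (List (String × String))) :
    compute_role_counts_py leaders = compute_role_counts_py_alt leaders := by
  unfold compute_role_counts_py compute_role_counts_py_alt
  rw [pv_foldA_eq_foldRoles, PySem.Dict.foldl_insert_getD_add_one_eq_counter,
    PySem.Dict.items_counter]
  simp [PySem.List.dedup_eq_ofList]

-- ===== VERDICT (by name: the statement is the Claim_ definition above) =====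
theorem compute_role_counts_py_spec : Claim_equal_compute_role_counts_py := by
  intro leaders _
  exact compute_role_counts_py_spec_aux leaders
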